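-- pv_equiv track=rewrite | github.com/rafaelsaidbc/USP | coh_piah.py | numero_palavras_unicas
-- ===== SOURCE A (Python) =====
-- def numero_palavras_unicas(lista_palavras):
--     """
--     Essa funcao recebe uma lista de palavras e devolve o numero de palavras
--     que aparecem uma unica vez.
--     """
--     frequencia = dict()
--     unicas = 0
--     for palavra in lista_palavras:
--         p = palavra.lower()
--         if p in frequencia:
--             if frequencia[p] == 1:
--                 unicas -= 1
--             frequencia[p] += 1
--         else:
--             frequencia[p] = 1
--             unicas += 1
--
--     return unicas
-- ===== SOURCE B (Python) =====
-- def numero_palavras_unicas(lista_palavras):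
--     """
--     Essa funcao recebe uma lista de palavras e devolve o numero de palavras
--     que aparecem uma unica vez.
--     """
--     minusculas = [palavra.lower() for palavra in lista_palavras]
--     return sum(1 for p in set(minusculas) if minusculas.count(p) == 1)
-- ===== Notes on version B (the rewrite author's own statement) =====
-- stated objective: alternative
-- what changed: Drops the hash-table frequency counter entirely: B lowercases once, deduplicates with set(), and for each distinct word rescans the list with list.count to test whether it occurs exactly once (nested scans instead of A's incremental dict with online unique-counter bookkeeping).
import Mathlib
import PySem

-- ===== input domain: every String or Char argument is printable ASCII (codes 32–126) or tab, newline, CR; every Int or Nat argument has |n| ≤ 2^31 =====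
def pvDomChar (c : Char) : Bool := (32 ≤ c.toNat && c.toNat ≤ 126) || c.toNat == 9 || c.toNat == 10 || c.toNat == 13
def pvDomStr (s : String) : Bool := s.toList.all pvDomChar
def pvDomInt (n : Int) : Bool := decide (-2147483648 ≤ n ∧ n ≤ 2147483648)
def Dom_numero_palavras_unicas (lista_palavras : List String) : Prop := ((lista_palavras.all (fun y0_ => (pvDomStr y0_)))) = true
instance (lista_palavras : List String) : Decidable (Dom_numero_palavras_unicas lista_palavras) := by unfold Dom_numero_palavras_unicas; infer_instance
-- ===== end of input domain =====

-- B drops A's hash-table counter and online unique-counter bookkeeping: it deduplicates with set() and rescans the list with list.count per distinct word; objective: alternative.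

-- ===== PORT A =====
-- Literal port of A: one fold carrying (frequencia, unicas), updating unicas inline.
def numero_palavras_unicas (lista_palavras : List String) : Int :=
  (lista_palavras.foldl (fun st palavra =>
      let p := PySem.Str.lower palavra
      if st.1.contains p then
        (st.1.insert p (st.1.getD p 0 + 1), if st.1.getD p 0 == 1 then st.2 - 1 else st.2)
      else
        (st.1.insert p 1, st.2 + 1))
    ((PySem.Dict.empty : PySem.Dict String Int), (0 : Int))).2

-- ===== PORT B =====
-- Port of B: lowercase once, deduplicate with set(), rescan with list.count per distinct word.
def numero_palavras_unicas_alt (lista_palavras : List String) : Int :=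
  let minusculas := lista_palavras.map PySem.Str.lower
  (PySem.Set.ofList minusculas).foldl
    (fun acc p => if minusculas.count p == 1 then acc + 1 else acc) (0 : Int)

-- ===== PRECONDITION & SPEC =====
def Spec_numero_palavras_unicas (lista_palavras : List String) (out : Int) : Prop := out = numero_palavras_unicas_alt lista_palavras
instance (lista_palavras : List String) (out : Int) : Decidable (Spec_numero_palavras_unicas lista_palavras out) := by unfold Spec_numero_palavras_unicas; infer_instance

-- ===== CLAIM (what is proved, stated in full; the proofs are below) =====
def Claim_equal_numero_palavras_unicas : Prop := ∀ (lista_palavras : List String), Dom_numero_palavras_unicas lista_palavras → Spec_numero_palavras_unicas lista_palavras (numero_palavras_unicas lista_palavras)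

-- ===== LEMMAS AND PROOFS =====

-- number of distinct words of m occurring exactly once in m
def uniqN (m : List String) : Nat := (PySem.Set.ofList m).countP (fun k => m.count k == 1)

theorem count_append_singleton_of_ne {m : List String} {p k : String} (h : k ≠ p) :
    (m ++ [p]).count k = m.count k := by
  simp [List.count_append, h.symm]

theorem uniq_append_not_mem {m : List String} {p : String} (h : p ∉ m) :
    uniqN (m ++ [p]) = uniqN m + 1 := by
  unfold uniqN
  rw [PySem.Set.ofList_append_singleton,
      PySem.Set.add_of_not_mem (by simpa [PySem.Set.mem_ofList] using h),
      List.countP_append]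
  have h0 : m.count p = 0 := List.count_eq_zero_of_not_mem h
  have h2 : List.countP (fun k => (m ++ [p]).count k == 1) [p] = 1 := by
    simp [List.count_append, h0]
  have h3 : (PySem.Set.ofList m).countP (fun k => (m ++ [p]).count k == 1)
      = (PySem.Set.ofList m).countP (fun k => m.count k == 1) := by
    apply List.countP_congr
    intro k hk
    have hkm : k ∈ m := (PySem.Set.mem_ofList _ _).1 hk
    have hne : k ≠ p := fun e => h (e ▸ hkm)
    rw [count_append_singleton_of_ne hne]
  rw [h3, h2]

-- countP of the set of m, under the predicate for m ++ [p], decomposed at p (for p ∈ m)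
theorem uniq_mem_decomp {m : List String} {p : String} (h : p ∈ m) :
    uniqN m = (if m.count p = 1 then 1 else 0) + ((PySem.Set.ofList m).erase p).countP (fun k => m.count k == 1) ∧
    uniqN (m ++ [p]) = ((PySem.Set.ofList m).erase p).countP (fun k => m.count k == 1) := by
  have hs : p ∈ PySem.Set.ofList m := (PySem.Set.mem_ofList _ _).2 h
  have hnd : (PySem.Set.ofList m).Nodup := PySem.Set.nodup_ofList _
  have hperm := List.perm_cons_erase hs
  have hpe : p ∉ (PySem.Set.ofList m).erase p := hnd.not_mem_erase
  have herase : ∀ (q : String → Bool), ((PySem.Set.ofList m).erase p).countP q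
      = (PySem.Set.ofList m).countP q - (if q p then 1 else 0) := by
    intro q
    have := hperm.countP_eq q
    simp [List.countP_cons] at this
    omega
  have hcongr : ((PySem.Set.ofList m).erase p).countP (fun k => (m ++ [p]).count k == 1)
      = ((PySem.Set.ofList m).erase p).countP (fun k => m.count k == 1) := by
    apply List.countP_congr
    intro k hk
    have hne : k ≠ p := fun e => hpe (e ▸ hk)
    rw [count_append_singleton_of_ne hne]
  have hpos : 0 < m.count p := List.count_pos_iff.2 h
  have hq' : ((m ++ [p]).count p == 1) = false := by
    simp [List.count_append]
    omega
  constructor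
  · have h1 := hperm.countP_eq (fun k => m.count k == 1)
    rw [uniqN, h1, List.countP_cons]
    by_cases hc : m.count p = 1
    · simp [hc]; omega
    · simp [hc]
  · have h2 : uniqN (m ++ [p]) = (PySem.Set.ofList m).countP (fun k => (m ++ [p]).count k == 1) := by
      rw [uniqN, PySem.Set.ofList_append_singleton, PySem.Set.add_of_mem hs]
    have h3 := hperm.countP_eq (fun k => (m ++ [p]).count k == 1)
    rw [h2, h3, List.countP_cons, hcongr, hq']
    simp

theorem uniq_append_mem_one {m : List String} {p : String} (h : p ∈ m) (hc : m.count p = 1) :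
    uniqN m = uniqN (m ++ [p]) + 1 := by
  obtain ⟨h1, h2⟩ := uniq_mem_decomp h
  rw [h1, h2]
  simp [hc]
  omega

theorem uniq_append_mem_ne {m : List String} {p : String} (h : p ∈ m) (hc : m.count p ≠ 1) :
    uniqN (m ++ [p]) = uniqN m := by
  obtain ⟨h1, h2⟩ := uniq_mem_decomp h
  rw [h1, h2]
  simp [hc]

theorem A_loop (L : List String) : ∀ (m : List String) (d : PySem.Dict String Int) (u : Int),
    (∀ k, d.getD k 0 = m.count k) → (∀ k, d.contains k = decide (k ∈ m)) → u = (uniqN m : Int) →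
    (L.foldl (fun st palavra =>
      let p := PySem.Str.lower palavra
      if st.1.contains p then
        (st.1.insert p (st.1.getD p 0 + 1), if st.1.getD p 0 == 1 then st.2 - 1 else st.2)
      else
        (st.1.insert p 1, st.2 + 1)) (d, u)).2 = (uniqN (m ++ L.map PySem.Str.lower) : Int) := by
  induction L with
  | nil => intro m d u _ _ h3; simpa using h3
  | cons w L ih =>
    intro m d u h1 h2 h3
    simp only [List.foldl_cons, List.map_cons]
    rw [h2]
    have hassoc : m ++ PySem.Str.lower w :: L.map PySem.Str.lower
        = (m ++ [PySem.Str.lower w]) ++ L.map PySem.Str.lower := by simp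
    rw [hassoc]
    by_cases hp : PySem.Str.lower w ∈ m
    · simp only [hp, decide_true, if_true, h1]
      apply ih
      · intro k
        rw [PySem.Dict.getD_insert]
        by_cases hk : k = PySem.Str.lower w
        · subst hk; simp [List.count_append]
        · rw [if_neg hk, h1, count_append_singleton_of_ne hk]
      · intro k
        rw [PySem.Dict.contains_insert, h2]
        by_cases hk : k = PySem.Str.lower w <;> simp [hk, hp]
      · by_cases hc : m.count (PySem.Str.lower w) = 1
        · have h4 := uniq_append_mem_one hp hc
          have hb : (((m.count (PySem.Str.lower w) : Int)) == 1) = true := by simp [hc]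
          rw [hb, if_pos rfl, h3, h4]
          push_cast
          ring
        · have h4 := uniq_append_mem_ne hp hc
          have hb : (((m.count (PySem.Str.lower w) : Int)) == 1) = false := by
            simp [Nat.cast_eq_one, hc]
          rw [hb]
          simp [h3, h4]
    · simp only [hp, decide_false]
      apply ih
      · intro k
        rw [PySem.Dict.getD_insert]
        by_cases hk : k = PySem.Str.lower w
        · subst hk
          simp [List.count_append, List.count_eq_zero_of_not_mem hp]
        · rw [if_neg hk, h1, count_append_singleton_of_ne hk]
      · intro k
        rw [PySem.Dict.contains_insert, h2]
        by_cases hk : k = PySem.Str.lower w <;> simp [hk]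
      · rw [uniq_append_not_mem hp, h3]
        push_cast
        ring

theorem B_eq (L : List String) : numero_palavras_unicas_alt L = (uniqN (L.map PySem.Str.lower) : Int) := by
  unfold numero_palavras_unicas_alt
  rw [PySem.List.foldl_if_add_one]
  simp [uniqN]

-- ===== VERDICT (by name: the statement is the Claim_ definition above) =====
theorem numero_palavras_unicas_spec : Claim_equal_numero_palavras_unicas := by
  intro L _
  show _ = _
  rw [B_eq, numero_palavras_unicas]
  have := A_loop L [] PySem.Dict.empty 0
    (fun k => by simp) (fun k => by simp) (by simp [uniqN])
  simpa using this
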